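-- pv_equiv track=rewrite | github.com/TranVanDu-CN22E/scam-job-detection | ocr_engine.py | remove_duplicate_boxes
-- ===== SOURCE A (Python) =====
-- def remove_duplicate_boxes(boxes, y_thresh=10):
--
--     filtered = []
--
--     for box in boxes:
--         y1 = box[1]
--
--         keep = True
--
--         for fbox in filtered:
--             fy1 = fbox[1]
--             if abs(y1 - fy1) < y_thresh:
--                 keep = False
--                 break
--
--         if keep:
--             filtered.append(box)
--
--     return filtered
-- ===== SOURCE B (Python) =====
-- def _bisect_left(ys, y):
--     # hand-rolled bisect.bisect_left (module not imported by the original file)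
--     lo, hi = 0, len(ys)
--     while lo < hi:
--         mid = (lo + hi) // 2
--         if ys[mid] < y:
--             lo = mid + 1
--         else:
--             hi = mid
--     return lo
--
--
-- def remove_duplicate_boxes(boxes, y_thresh=10):
--     filtered = []
--     ys = []  # sorted list of y1 values of kept boxes
--     for box in boxes:
--         y1 = box[1]
--         i = _bisect_left(ys, y1)
--         near = (i > 0 and y1 - ys[i - 1] < y_thresh) or \
--                (i < len(ys) and ys[i] - y1 < y_thresh)
--         if not near:
--             filtered.append(box)
--             ys.insert(i, y1)
--     return filtered
-- ===== Notes on version B (the rewrite author's own statement) =====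
-- stated objective: alternative
-- what changed: Instead of scanning every kept box for each new box, B maintains a sorted list of kept y1 values and binary-searches (hand-rolled bisect_left, since the module imports nothing) for the two nearest neighbours, which on a sorted list decide the proximity test; it trades the inner scan for O(log k) search plus an ordered insert.
import Mathlib
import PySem

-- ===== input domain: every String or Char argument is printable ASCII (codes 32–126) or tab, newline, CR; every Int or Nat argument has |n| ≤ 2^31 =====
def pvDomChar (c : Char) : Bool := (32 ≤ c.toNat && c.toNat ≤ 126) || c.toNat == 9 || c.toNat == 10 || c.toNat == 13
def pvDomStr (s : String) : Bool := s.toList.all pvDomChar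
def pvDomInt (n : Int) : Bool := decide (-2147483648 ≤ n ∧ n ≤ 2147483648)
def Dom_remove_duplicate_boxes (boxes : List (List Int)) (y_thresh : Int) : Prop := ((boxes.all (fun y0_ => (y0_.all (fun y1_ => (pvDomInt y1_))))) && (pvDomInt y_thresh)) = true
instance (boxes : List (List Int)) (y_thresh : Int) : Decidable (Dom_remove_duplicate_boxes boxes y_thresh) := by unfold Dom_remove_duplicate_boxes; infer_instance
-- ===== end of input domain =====

-- B replaces A's inner scan over all kept boxes by a sorted list of kept y1 values
-- and a binary search for the nearest neighbours (objective: alternative algorithm, same results).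

-- ===== PORT A =====
-- loop body of A's 'for box in boxes' (filtered is the accumulator)
def rdbStepA (y_thresh : Int) (filtered : List (List Int)) (box : List Int) : List (List Int) :=
  let y1 := PySem.List.pyGetD box 1 0          -- box[1]; in range on Pre_
  let keep := filtered.all fun fbox =>
    !decide (|y1 - PySem.List.pyGetD fbox 1 0| < y_thresh)   -- inner scan with break
  if keep then filtered ++ [box] else filtered

def remove_duplicate_boxes (boxes : List (List Int)) (y_thresh : Int) : List (List Int) :=
  boxes.foldl (rdbStepA y_thresh) []

-- ===== PORT B =====
-- loop body of B: state = (filtered, sorted y1 values of kept boxes);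
-- _bisect_left in Source B is exactly the lo/hi binary-search loop PySem.List.bisectLeft
def rdbStepB (y_thresh : Int) (st : List (List Int) × List Int) (box : List Int) :
    List (List Int) × List Int :=
  let y1 := PySem.List.pyGetD box 1 0          -- box[1]; in range on Pre_
  let i := PySem.List.bisectLeft st.2 y1
  let near := (decide (0 < i) && decide (y1 - st.2.getD (i - 1) 0 < y_thresh))
           || (decide (i < st.2.length) && decide (st.2.getD i 0 - y1 < y_thresh))
  if near then st else (st.1 ++ [box], PySem.List.insert st.2 (i : Int) y1)

def remove_duplicate_boxes_alt (boxes : List (List Int)) (y_thresh : Int) : List (List Int) :=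
  (boxes.foldl (rdbStepB y_thresh) ([], [])).1

-- ===== PRECONDITION & SPEC =====
-- Pre_ excludes exactly the inputs where A raises IndexError: a box with fewer than 2 entries.
def Pre_remove_duplicate_boxes (boxes : List (List Int)) (y_thresh : Int) : Prop :=
  ∀ box ∈ boxes, 2 ≤ box.length
instance (boxes : List (List Int)) (y_thresh : Int) : Decidable (Pre_remove_duplicate_boxes boxes y_thresh) := by unfold Pre_remove_duplicate_boxes; infer_instance

def pvWitness_remove_duplicate_boxes : List (List Int) × Int := ([[0, 5, 9], [1, 8, 3], [2, 30, 4]], 10)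

def Spec_remove_duplicate_boxes (boxes : List (List Int)) (y_thresh : Int) (out : List (List Int)) : Prop := out = remove_duplicate_boxes_alt boxes y_thresh
instance (boxes : List (List Int)) (y_thresh : Int) (out : List (List Int)) : Decidable (Spec_remove_duplicate_boxes boxes y_thresh out) := by unfold Spec_remove_duplicate_boxes; infer_instance

-- ===== CLAIM (what is proved, stated in full; the proofs are below) =====
def Claim_equal_remove_duplicate_boxes : Prop := ∀ (boxes : List (List Int)) (y_thresh : Int), Dom_remove_duplicate_boxes boxes y_thresh → Pre_remove_duplicate_boxes boxes y_thresh → Spec_remove_duplicate_boxes boxes y_thresh (remove_duplicate_boxes boxes y_thresh)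

-- ===== LEMMAS AND PROOFS =====

-- PySem.List.insert at a nonnegative in-range index is insertion at that position
theorem rdb_insert_eq (xs : List Int) (i : Nat) (v : Int) (hle : i ≤ xs.length) :
    PySem.List.insert xs (i : Int) v = xs.take i ++ v :: xs.drop i := by
  have h : ¬((i : Int) < 0) := by omega
  have h2 : min (i : Int) (xs.length : Int) = (i : Int) := by omega
  simp [PySem.List.insert, PySem.List.sliceIndices, h, h2]

-- the binary-search neighbour test equals "some kept y1 is within y_thresh"
theorem rdb_near_iff (ys : List Int) (y1 t : Int) (hs : ys.Pairwise (· ≤ ·)) :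
    ((0 < PySem.List.bisectLeft ys y1 ∧ y1 - ys.getD (PySem.List.bisectLeft ys y1 - 1) 0 < t) ∨
     (PySem.List.bisectLeft ys y1 < ys.length ∧ ys.getD (PySem.List.bisectLeft ys y1) 0 - y1 < t))
    ↔ ∃ v ∈ ys, |y1 - v| < t := by
  obtain ⟨hle, hlt, hge⟩ := PySem.List.bisectLeft_spec ys y1 hs
  set i := PySem.List.bisectLeft ys y1 with hi
  constructor
  · rintro (⟨hpos, hnear⟩ | ⟨hlen, hnear⟩)
    · have hidx : i - 1 < ys.length := by omega
      refine ⟨ys[i-1], List.getElem_mem hidx, ?_⟩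
      have := hlt (i-1) hidx (by omega)
      rw [List.getD_eq_getElem ys 0 hidx] at hnear
      rw [abs_sub_lt_iff]
      omega
    · refine ⟨ys[i], List.getElem_mem hlen, ?_⟩
      have := hge i hlen (le_refl i)
      rw [List.getD_eq_getElem ys 0 hlen] at hnear
      rw [abs_sub_lt_iff]
      omega
  · rintro ⟨v, hv, habs⟩
    obtain ⟨j, hj, rfl⟩ := List.mem_iff_getElem.mp hv
    rw [abs_sub_lt_iff] at habs
    by_cases hvy : ys[j] < y1
    · -- witness is left of the insertion point
      have hji : j < i := by
        by_contra hge'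
        have := hge j hj (by omega); omega
      have hipos : 0 < i := by omega
      have hidx : i - 1 < ys.length := by omega
      left
      refine ⟨hipos, ?_⟩
      have hmono : ys[j] ≤ ys[i-1] := by
        rcases Nat.lt_or_ge j (i-1) with h' | h'
        · exact (List.pairwise_iff_getElem.mp hs) j (i-1) hj hidx h'
        · have : j = i - 1 := by omega
          subst this; exact le_refl _
      rw [List.getD_eq_getElem ys 0 hidx]
      omega
    · -- witness is at or right of the insertion point
      have hji : i ≤ j := by
        by_contra h'
        have := hlt j hj (by omega); omega
      have hlen : i < ys.length := by omega
      right
      refine ⟨hlen, ?_⟩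
      have hmono : ys[i] ≤ ys[j] := by
        rcases Nat.lt_or_ge i j with h' | h'
        · exact (List.pairwise_iff_getElem.mp hs) i j hlen hj h'
        · have : i = j := by omega
          subst this; exact le_refl _
      have := hge i hlen (le_refl i)
      rw [List.getD_eq_getElem ys 0 hlen]
      omega

-- inserting y1 at its bisect position keeps the list sorted
theorem rdb_insert_sorted (ys : List Int) (y1 : Int) (hs : ys.Pairwise (· ≤ ·)) :
    (ys.take (PySem.List.bisectLeft ys y1) ++ y1 :: ys.drop (PySem.List.bisectLeft ys y1)).Pairwise (· ≤ ·) := by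
  obtain ⟨hle, hlt, hge⟩ := PySem.List.bisectLeft_spec ys y1 hs
  set i := PySem.List.bisectLeft ys y1 with hi
  have htk : ∀ x ∈ ys.take i, x < y1 := by
    intro x hx
    obtain ⟨j, hj, rfl⟩ := List.mem_iff_getElem.mp hx
    have hj' : j < ys.length := by
      have := hj; simp [List.length_take] at this; omega
    rw [List.getElem_take]
    exact hlt j hj' (by have := hj; simp [List.length_take] at this; omega)
  have hdp : ∀ x ∈ ys.drop i, y1 ≤ x := by
    intro x hx
    obtain ⟨j, hj, rfl⟩ := List.mem_iff_getElem.mp hx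
    rw [List.getElem_drop]
    exact hge (i + j) (by have := hj; simp [List.length_drop] at this; omega) (by omega)
  refine List.pairwise_append.mpr ⟨hs.sublist (List.take_sublist i ys), ?_, ?_⟩
  · exact List.pairwise_cons.mpr ⟨hdp, hs.sublist (List.drop_sublist i ys)⟩
  · intro a ha b hb
    rcases List.mem_cons.mp hb with rfl | hb'
    · exact le_of_lt (htk a ha)
    · exact le_of_lt (lt_of_lt_of_le (htk a ha) (hdp b hb'))

-- the main loop invariant: same filtered list, and ys holds exactly the kept y1 values
theorem rdb_loop (t : Int) (boxes : List (List Int)) :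
    ∀ (filtered : List (List Int)) (ys : List Int),
      ys.Pairwise (· ≤ ·) →
      (∀ v, v ∈ ys ↔ ∃ fbox ∈ filtered, PySem.List.pyGetD fbox 1 0 = v) →
      boxes.foldl (rdbStepA t) filtered = (boxes.foldl (rdbStepB t) (filtered, ys)).1 := by
  induction boxes with
  | nil => intro filtered ys _ _; rfl
  | cons box rest ih =>
    intro filtered ys hs hmem
    simp only [List.foldl_cons]
    set y1 := PySem.List.pyGetD box 1 0 with hy1
    set i := PySem.List.bisectLeft ys y1 with hidef
    have hnear_iff := rdb_near_iff ys y1 t hs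
    by_cases hN : (0 < i ∧ y1 - ys.getD (i - 1) 0 < t) ∨ (i < ys.length ∧ ys.getD i 0 - y1 < t)
    · -- near: both sides drop the box
      have hex : ∃ fbox ∈ filtered, |y1 - PySem.List.pyGetD fbox 1 0| < t := by
        obtain ⟨v, hv, habs⟩ := hnear_iff.mp hN
        obtain ⟨fbox, hf, rfl⟩ := (hmem v).mp hv
        exact ⟨fbox, hf, habs⟩
      have hA : rdbStepA t filtered box = filtered := by
        obtain ⟨fbox, hf, habs⟩ := hex
        simp only [rdbStepA, ← hy1]
        rw [if_neg]
        simp only [List.all_eq_true, not_forall]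
        exact ⟨fbox, hf, by simp [habs]⟩
      have hB : rdbStepB t (filtered, ys) box = (filtered, ys) := by
        simp only [rdbStepB, ← hy1, ← hidef]
        rw [if_pos]
        simpa [Bool.or_eq_true, Bool.and_eq_true, decide_eq_true_iff] using hN
      rw [hA, hB]
      exact ih filtered ys hs hmem
    · -- not near: both sides keep the box
      have hnex : ¬ ∃ fbox ∈ filtered, |y1 - PySem.List.pyGetD fbox 1 0| < t := by
        intro ⟨fbox, hf, habs⟩
        exact hN (hnear_iff.mpr ⟨_, (hmem _).mpr ⟨fbox, hf, rfl⟩, habs⟩)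
      have hA : rdbStepA t filtered box = filtered ++ [box] := by
        simp only [rdbStepA, ← hy1]
        rw [if_pos]
        simp only [List.all_eq_true]
        intro fbox hf
        simp only [Bool.not_eq_eq_eq_not, Bool.not_true, decide_eq_false_iff_not]
        exact fun habs => hnex ⟨fbox, hf, habs⟩
      have hB : rdbStepB t (filtered, ys) box
          = (filtered ++ [box], PySem.List.insert ys (i : Int) y1) := by
        simp only [rdbStepB, ← hy1, ← hidef]
        rw [if_neg]
        simpa [Bool.or_eq_true, Bool.and_eq_true, decide_eq_true_iff] using hN
      rw [hA, hB]
      obtain ⟨hle, _, _⟩ := PySem.List.bisectLeft_spec ys y1 hs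
      rw [rdb_insert_eq ys i y1 hle]
      apply ih
      · exact rdb_insert_sorted ys y1 hs
      · intro v
        constructor
        · intro hv
          rcases List.mem_append.mp hv with h' | h'
          · obtain ⟨fbox, hf, rfl⟩ := (hmem v).mp (List.mem_of_mem_take h')
            exact ⟨fbox, List.mem_append_left _ hf, rfl⟩
          · rcases List.mem_cons.mp h' with rfl | h''
            · exact ⟨box, List.mem_append_right _ (List.mem_singleton.mpr rfl), rfl⟩
            · obtain ⟨fbox, hf, rfl⟩ := (hmem v).mp (List.mem_of_mem_drop h'')
              exact ⟨fbox, List.mem_append_left _ hf, rfl⟩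
        · rintro ⟨fbox, hf, rfl⟩
          rcases List.mem_append.mp hf with h' | h'
          · have hv : PySem.List.pyGetD fbox 1 0 ∈ ys := (hmem _).mpr ⟨fbox, h', rfl⟩
            have : PySem.List.pyGetD fbox 1 0 ∈ ys.take i ++ ys.drop i := by
              rw [List.take_append_drop]; exact hv
            rcases List.mem_append.mp this with h'' | h''
            · exact List.mem_append_left _ h''
            · exact List.mem_append_right _ (List.mem_cons_of_mem _ h'')
          · rcases List.mem_singleton.mp h'
            exact List.mem_append_right _ (List.mem_cons_self)

-- ===== VERDICT (by name: the statement is the Claim_ definition above) =====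
theorem remove_duplicate_boxes_spec : Claim_equal_remove_duplicate_boxes := by
  intro boxes y_thresh _ _
  unfold Spec_remove_duplicate_boxes remove_duplicate_boxes remove_duplicate_boxes_alt
  exact rdb_loop y_thresh boxes [] [] List.Pairwise.nil (by simp)
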